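-- pv_equiv track=rewrite | github.com/UlsanCollege-English/week-4-metro-city-help-center-rajgh1020 | src/challenges.py | undo_recent_actions
-- ===== SOURCE A (Python) =====
-- class ActionStack:
--     """Stack of recent help-center actions using a Python list."""
--
--     def __init__(self) -> None:
--         self.items: list[str] = []
--
--     def push(self, action: str) -> None:
--         """Add an action to the top of the stack."""
--         self.items.append(action)
--
--     def pop(self) -> str | None:
--         """Remove and return the top action, or None if empty."""
--         if self.is_empty():
--             return None
--         return self.items.pop()
--
--     def peek(self) -> str | None:
--         """Return the top action without removing it, or None if empty."""
--         if self.is_empty():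
--             return None
--         return self.items[-1]
--
--     def is_empty(self) -> bool:
--         """Return True if the stack has no actions."""
--         return len(self.items) == 0
--
-- def undo_recent_actions(actions: list[str], undo_count: int) -> list[str]:
--     """Optional stretch: remove the most recent undo_count actions."""
--     stack = ActionStack()
--
--     for action in actions:
--         stack.push(action)
--
--     for _ in range(undo_count):
--         if not stack.is_empty():
--             stack.pop()
--
--     # Return remaining actions in correct order
--     return stack.items
-- ===== SOURCE B (Python) =====
-- def undo_recent_actions(actions: list[str], undo_count: int) -> list[str]:
--     keep = len(actions) - min(max(undo_count, 0), len(actions))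
--     return actions[:keep]
-- ===== Notes on version B (the rewrite author's own statement) =====
-- stated objective: simpler
-- what changed: Replaces the ActionStack class, the push loop and the conditional pop loop with a closed-form clamp and a single slice actions[:keep].
import Mathlib
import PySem

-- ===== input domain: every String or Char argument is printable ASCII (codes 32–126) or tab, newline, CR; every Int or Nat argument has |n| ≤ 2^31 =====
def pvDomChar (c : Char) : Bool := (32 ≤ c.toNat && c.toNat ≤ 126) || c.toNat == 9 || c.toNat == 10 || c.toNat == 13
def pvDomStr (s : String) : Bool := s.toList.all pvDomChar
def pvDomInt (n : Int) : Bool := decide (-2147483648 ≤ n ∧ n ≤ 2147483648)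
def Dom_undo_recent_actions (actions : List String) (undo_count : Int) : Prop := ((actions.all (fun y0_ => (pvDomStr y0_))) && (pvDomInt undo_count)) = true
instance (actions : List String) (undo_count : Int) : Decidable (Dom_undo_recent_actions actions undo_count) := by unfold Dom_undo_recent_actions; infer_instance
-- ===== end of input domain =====

-- B replaces A's push loop and conditional pop loop by a clamped closed-form slice actions[:keep]; same return value on every input.
-- ===== PORT A =====
def undo_recent_actions (actions : List String) (undo_count : Int) : List String :=
  let stack := actions.foldl (fun s a => s ++ [a]) []
  (List.range undo_count.toNat).foldl (fun s _ => if s.isEmpty then s else s.dropLast) stack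

-- ===== PORT B =====
def undo_recent_actions_alt (actions : List String) (undo_count : Int) : List String :=
  let keep : Int := (actions.length : Int) - min (max undo_count 0) (actions.length : Int)
  PySem.List.slice actions none (some keep)

-- ===== PRECONDITION & SPEC =====
def Spec_undo_recent_actions (actions : List String) (undo_count : Int) (out : List String) : Prop := out = undo_recent_actions_alt actions undo_count
instance (actions : List String) (undo_count : Int) (out : List String) : Decidable (Spec_undo_recent_actions actions undo_count out) := by unfold Spec_undo_recent_actions; infer_instance

-- ===== CLAIM (what is proved, stated in full; the proofs are below) =====
def Claim_equal_undo_recent_actions : Prop := ∀ (actions : List String) (undo_count : Int), Dom_undo_recent_actions actions undo_count → Spec_undo_recent_actions actions undo_count (undo_recent_actions actions undo_count)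

-- ===== LEMMAS AND PROOFS =====

theorem push_loop_id (actions : List String) :
    actions.foldl (fun s a => s ++ [a]) [] = actions := by
  have h : ∀ (xs acc : List String), xs.foldl (fun s a => s ++ [a]) acc = acc ++ xs := by
    intro xs
    induction xs with
    | nil => simp
    | cons x t ih => intro acc; simp [List.foldl, ih]
  simpa using h actions []

theorem pop_loop_take (n : Nat) (xs : List String) :
    (List.range n).foldl (fun s _ => if s.isEmpty then s else s.dropLast) xs
      = xs.take (xs.length - n) := by
  induction n with
  | zero => simp
  | succ m ih =>
    rw [List.range_succ, List.foldl_append, ih]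
    by_cases h : xs.length ≤ m
    · have h1 : xs.length - m = 0 := by omega
      have h2 : xs.length - (m + 1) = 0 := by omega
      simp [h1, h2]
    · have h1 : (xs.take (xs.length - m)).isEmpty = false := by
        simp only [List.isEmpty_eq_false_iff, ne_eq, List.take_eq_nil_iff, not_or]
        exact ⟨by omega, fun hx => h (by simp [hx])⟩
      simp only [List.foldl, h1, Bool.false_eq_true, if_false]
      rw [List.dropLast_eq_take, List.take_take]
      congr 1
      simp [List.length_take]
      omega

-- ===== VERDICT (by name: the statement is the Claim_ definition above) =====
theorem undo_recent_actions_spec : Claim_equal_undo_recent_actions := by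
  intro actions undo_count _
  unfold Spec_undo_recent_actions undo_recent_actions undo_recent_actions_alt
  rw [push_loop_id, pop_loop_take]
  rw [PySem.List.slice_to _ (by omega)]
  congr 1
  omega
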